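-- pv_equiv track=rewrite | github.com/lbbelak/rigoro_final | words_chain.py | words_rec
-- ===== SOURCE A (Python) =====
-- from typing import Set
--
-- def words_rec(actual: str, words: Set[str], biggest_all) -> int:
--     biggest = biggest_all
--     for word in words:
--         if word[0] == actual[-1]:
--             if len(words) != 1:
--                 to_match = words.copy()
--                 to_match.remove(word)
--                 candidate = words_rec(word, to_match, biggest_all + 1)
--                 if candidate > biggest:
--                     biggest = candidate
--             else:
--                 biggest += 1
--     return biggest
-- ===== SOURCE B (Python) =====
-- def words_rec(actual, words, biggest_all):
--     # Memoised bitmask DP: f(c, mask) = longest chain using only words in `mask`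
--     # whose first word starts with c.  Each (mask, c) state is computed once,
--     # instead of once per permutation prefix as in the naive recursive search.
--     words = list(words)
--     n = len(words)
--     if n == 0:
--         return biggest_all
--     firsts = [w[0] for w in words]
--     lasts = [w[-1] for w in words]
--     memo = {}
--     def f(c, mask):
--         key = (mask, c)
--         if key in memo:
--             return memo[key]
--         best = 0
--         for j in range(n):
--             if (mask >> j) & 1 and firsts[j] == c:
--                 sub = f(lasts[j], mask ^ (1 << j))
--                 if sub + 1 > best:
--                     best = sub + 1
--         memo[key] = best
--         return best
--     return biggest_all + f(actual[-1], (1 << n) - 1)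
-- ===== Notes on version B (the rewrite author's own statement) =====
-- stated objective: alternative
-- what changed: Replaced the recursive search that copies and shrinks the word set at every branch by a memoised bitmask dynamic program f(c, mask) = longest chain over the words in mask starting with char c, computing each (mask, char) state at most once.
import Mathlib
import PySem

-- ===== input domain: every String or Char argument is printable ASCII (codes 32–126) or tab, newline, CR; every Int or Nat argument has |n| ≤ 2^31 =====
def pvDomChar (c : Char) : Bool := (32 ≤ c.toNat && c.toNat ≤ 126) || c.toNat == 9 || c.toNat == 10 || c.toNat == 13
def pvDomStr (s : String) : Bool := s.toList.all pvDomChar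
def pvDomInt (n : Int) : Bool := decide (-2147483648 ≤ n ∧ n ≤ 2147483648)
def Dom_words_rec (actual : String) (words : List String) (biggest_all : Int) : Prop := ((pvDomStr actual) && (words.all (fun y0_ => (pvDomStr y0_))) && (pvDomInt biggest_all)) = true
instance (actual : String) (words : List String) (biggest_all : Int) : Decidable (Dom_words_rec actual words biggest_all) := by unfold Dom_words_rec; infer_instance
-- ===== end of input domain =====

-- B replaces A's recursive search over shrinking word sets by a memoised bitmask DP over (mask, char) states (objective: alternative).

-- w[0] / w[-1] for a nonempty ASCII string (Pre_ excludes the empty strings on which Python raises IndexError)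
def pvFirst (w : String) : Char := w.toList.headD ' '
def pvLast (w : String) : Char := w.toList.getLastD ' '

-- ===== PORT A =====
def words_rec (actual : String) (words : List String) (biggest_all : Int) : Int :=
  words.attach.foldl
    (fun biggest wh =>
      if pvFirst wh.1 = pvLast actual then
        if words.length ≠ 1 then
          let to_match := words.erase wh.1
          let candidate := words_rec wh.1 to_match (biggest_all + 1)
          if candidate > biggest then candidate else biggest
        else biggest + 1
      else biggest)
    biggest_all
termination_by words.length
decreasing_by
  have h1 := List.length_pos_of_mem wh.2
  have h2 := List.length_erase_of_mem wh.2
  omega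

-- ===== PORT B =====
-- needed by the port's termination proof: clearing a set bit decreases the mask
lemma xor_bit_lt (m j : Nat) (hb : m.testBit j = true) : m ^^^ (1 <<< j) < m := by
  apply Nat.lt_of_testBit j
  · rw [Nat.testBit_xor, Nat.one_shiftLeft, Nat.testBit_two_pow]
    simp [hb]
  · exact hb
  · intro k hk
    rw [Nat.testBit_xor, Nat.one_shiftLeft, Nat.testBit_two_pow]
    simp [show ¬ j = k from by omega]

-- the inner function f of Source B, threading the memo dict; returns (value, memo)
def pvMemoF (firsts lasts : List Char) (c : Char) (mask : Nat)
    (memo : PySem.Dict (Nat × Char) Int) : Int × PySem.Dict (Nat × Char) Int :=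
  match memo.get? (mask, c) with
  | some v => (v, memo)
  | none =>
    let r := (List.range firsts.length).foldl
      (fun (acc : Int × PySem.Dict (Nat × Char) Int) j =>
        if h : mask.testBit j ∧ firsts.getD j ' ' = c then
          let s := pvMemoF firsts lasts (lasts.getD j ' ') (mask ^^^ (1 <<< j)) acc.2
          (if s.1 + 1 > acc.1 then s.1 + 1 else acc.1, s.2)
        else acc)
      ((0 : Int), memo)
    (r.1, r.2.insert (mask, c) r.1)
termination_by mask
decreasing_by exact xor_bit_lt mask j h.1

def words_rec_alt (actual : String) (words : List String) (biggest_all : Int) : Int :=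
  let n := words.length
  if n = 0 then biggest_all
  else
    let firsts := words.map pvFirst
    let lasts := words.map pvLast
    biggest_all + (pvMemoF firsts lasts (pvLast actual) ((1 <<< n) - 1) PySem.Dict.empty).1

-- ===== PRECONDITION & SPEC =====
-- Pre_ excludes exactly the inputs on which the Python raises IndexError: an empty word in `words`
-- (word[0]) or, when `words` is nonempty, an empty `actual` (actual[-1]).
def Pre_words_rec (actual : String) (words : List String) (biggest_all : Int) : Prop :=
  (∀ w ∈ words, w ≠ "") ∧ (words ≠ [] → actual ≠ "")
instance (actual : String) (words : List String) (biggest_all : Int) : Decidable (Pre_words_rec actual words biggest_all) := by unfold Pre_words_rec; infer_instance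
def pvWitness_words_rec : String × List String × Int := ("ab", ["ba", "ab"], 0)

def Spec_words_rec (actual : String) (words : List String) (biggest_all : Int) (out : Int) : Prop := out = words_rec_alt actual words biggest_all
instance (actual : String) (words : List String) (biggest_all : Int) (out : Int) : Decidable (Spec_words_rec actual words biggest_all out) := by unfold Spec_words_rec; infer_instance

-- ===== CLAIM (what is proved, stated in full; the proofs are below) =====
def Claim_equal_words_rec : Prop := ∀ (actual : String) (words : List String) (biggest_all : Int), Dom_words_rec actual words biggest_all → Pre_words_rec actual words biggest_all → Spec_words_rec actual words biggest_all (words_rec actual words biggest_all)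

-- ===== LEMMAS AND PROOFS =====

-- reference function: length of the longest chain out of `ws` whose first word starts with `c`
def pvChain (c : Char) (ws : List String) : Int :=
  (ws.attach.map (fun wh =>
    if pvFirst wh.1 = c then 1 + pvChain (pvLast wh.1) (ws.erase wh.1) else 0)).foldl max 0
termination_by ws.length
decreasing_by
  have h1 := List.length_pos_of_mem wh.2
  have h2 := List.length_erase_of_mem wh.2
  omega

-- the words selected by the bits of `mask`
def maskSub (ws : List String) (m : Nat) : List String :=
  ((List.range ws.length).filter (fun j => m.testBit j)).map (fun j => ws.getD j "")

-- ---- max-fold algebra ----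
lemma if_gt_eq_max (a b : Int) : (if b > a then b else a) = max a b := by omega

lemma foldl_max_max (l : List Int) : ∀ (a b : Int), l.foldl max (max a b) = max a (l.foldl max b) := by
  induction l with
  | nil => intro a b; simp
  | cons x l ih =>
    intro a b
    simp only [List.foldl_cons]
    rw [show max (max a b) x = max a (max b x) by omega, ih]

lemma foldl_max_cons0 (z : Int) (l : List Int) : (z :: l).foldl max 0 = max z (l.foldl max 0) := by
  simp only [List.foldl_cons]
  rw [show max (0 : Int) z = max z 0 by omega, foldl_max_max]

lemma foldl_max_init_le (l : List Int) : ∀ a : Int, a ≤ l.foldl max a := by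
  induction l with
  | nil => intro a; simp
  | cons x l ih =>
    intro a
    simp only [List.foldl_cons]
    have := ih (max a x)
    omega

lemma foldl_max_nonneg (l : List Int) : 0 ≤ l.foldl max 0 := foldl_max_init_le l 0

lemma foldl_max_perm (l l' : List Int) (h : l.Perm l') : ∀ a : Int, l.foldl max a = l'.foldl max a := by
  induction h with
  | nil => intro a; rfl
  | cons x _ ih => intro a; simp only [List.foldl_cons]; exact ih _
  | swap x y l => intro a; simp only [List.foldl_cons]; rw [show max (max a y) x = max (max a x) y by omega]
  | trans _ _ ih1 ih2 => intro a; rw [ih1, ih2]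

lemma foldl_max_if_eq {α : Type} (f : α → Int) (q : α → Prop) [DecidablePred q]
    (hf : ∀ j, 0 ≤ f j) (h0 : ∀ j, ¬ q j → f j = 0) (l : List α) :
    ∀ (a : Int), 0 ≤ a →
      l.foldl (fun b j => if q j then max b (f j) else b) a = (l.map f).foldl max a := by
  induction l with
  | nil => intro a _; simp
  | cons x l ih =>
    intro a ha
    simp only [List.foldl_cons, List.map_cons]
    by_cases hq : q x
    · rw [if_pos hq, ih (max a (f x)) (by have := hf x; omega)]
    · rw [if_neg hq, ih a ha, h0 x hq]
      congr 1
      omega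

lemma foldl_max_filter {α : Type} (p : α → Bool) (g : α → Int) (hg : ∀ j, 0 ≤ g j) (l : List α) :
    ((l.filter p).map g).foldl max 0 = (l.map (fun j => if p j then g j else 0)).foldl max 0 := by
  induction l with
  | nil => simp
  | cons x l ih =>
    by_cases hp : p x
    · simp only [List.filter_cons, hp, if_pos, List.map_cons, ite_true]
      rw [foldl_max_cons0, foldl_max_cons0, ih]
    · simp only [List.filter_cons, hp, List.map_cons, if_false, Bool.false_eq_true, ite_false]
      rw [foldl_max_cons0, ih]
      have := foldl_max_nonneg (l.map (fun j => if p j then g j else 0))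
      omega

-- ---- pvChain basics ----
lemma pvChain_eq (c : Char) (ws : List String) :
    pvChain c ws =
      (ws.map (fun w => if pvFirst w = c then 1 + pvChain (pvLast w) (ws.erase w) else 0)).foldl max 0 := by
  rw [pvChain]
  exact congrArg (List.foldl max 0)
    (List.attach_map_val (l := ws)
      (f := fun w => if pvFirst w = c then 1 + pvChain (pvLast w) (ws.erase w) else 0))

lemma pvChain_nil (c : Char) : pvChain c [] = 0 := by
  rw [pvChain_eq]; simp

lemma pvChain_nonneg (c : Char) (ws : List String) : 0 ≤ pvChain c ws := by
  rw [pvChain_eq]; exact foldl_max_nonneg _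

lemma pvChain_perm (ws ws' : List String) (h : ws.Perm ws') (c : Char) :
    pvChain c ws = pvChain c ws' := by
  induction hn : ws.length using Nat.strong_induction_on generalizing ws ws' c with
  | _ n ih =>
  subst hn
  rw [pvChain_eq, pvChain_eq]
  have hfun : ∀ w ∈ ws,
      (if pvFirst w = c then 1 + pvChain (pvLast w) (ws.erase w) else 0) =
      (if pvFirst w = c then 1 + pvChain (pvLast w) (ws'.erase w) else 0) := by
    intro w hw
    have hlen : (ws.erase w).length < ws.length := by
      have h1 := List.length_pos_of_mem hw
      have h2 := List.length_erase_of_mem hw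
      omega
    rw [ih _ hlen (ws.erase w) (ws'.erase w) (h.erase w) _ rfl]
  rw [List.map_congr_left hfun]
  have hperm : (ws.map (fun w => if pvFirst w = c then 1 + pvChain (pvLast w) (ws'.erase w) else 0)).Perm
      (ws'.map (fun w => if pvFirst w = c then 1 + pvChain (pvLast w) (ws'.erase w) else 0)) := h.map _
  exact foldl_max_perm _ _ hperm 0

lemma foldl_max_if_shift {α : Type} (f : α → Int) (q : α → Prop) [DecidablePred q]
    (hf : ∀ j, 0 ≤ f j) (b : Int) (l : List α) :
    ∀ a : Int, b ≤ a →
      l.foldl (fun acc x => if q x then max acc (b + 1 + f x) else acc) a =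
        max a (b + (l.map (fun x => if q x then 1 + f x else 0)).foldl max 0) := by
  induction l with
  | nil => intro a ha; simp; omega
  | cons x l ih =>
    intro a ha
    simp only [List.map_cons]
    rw [foldl_max_cons0]
    simp only [List.foldl_cons]
    by_cases hq : q x
    · rw [if_pos hq, if_pos hq, ih (max a (b + 1 + f x)) (by omega)]
      omega
    · rw [if_neg hq, if_neg hq, ih a ha]
      have := foldl_max_nonneg (l.map (fun x => if q x then 1 + f x else 0))
      omega

-- ---- A-side ----
lemma words_rec_eq (ws : List String) (actual : String) (b : Int) :
    words_rec actual ws b = b + pvChain (pvLast actual) ws := by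
  induction hn : ws.length using Nat.strong_induction_on generalizing ws actual b with
  | _ n ih =>
  subst hn
  rw [words_rec]
  by_cases h1 : ws.length = 1
  · obtain ⟨w, t⟩ : ∃ w, ws = [w] := by
      match ws, h1 with
      | [w], _ => exact ⟨w, rfl⟩
    subst t
    simp only [List.attach_cons, List.attach_nil, List.foldl_cons, List.foldl_nil,
      List.length_cons, List.length_nil, ne_eq, h1, not_true_eq_false, if_false]
    rw [pvChain_eq]
    simp only [List.map_cons, List.map_nil, List.erase_cons_head, pvChain_nil]
    split_ifs with h
    · simp [List.foldl]
    · simp [List.foldl]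
  · show ws.attach.foldl (fun biggest wh =>
        if pvFirst wh.1 = pvLast actual then
          if ws.length ≠ 1 then
            (if words_rec wh.1 (ws.erase wh.1) (b + 1) > biggest then
              words_rec wh.1 (ws.erase wh.1) (b + 1) else biggest)
          else biggest + 1
        else biggest) b = b + pvChain (pvLast actual) ws
    have hfun : (fun (biggest : Int) (wh : {x // x ∈ ws}) =>
        if pvFirst wh.1 = pvLast actual then
          if ws.length ≠ 1 then
            (if words_rec wh.1 (ws.erase wh.1) (b + 1) > biggest then
              words_rec wh.1 (ws.erase wh.1) (b + 1) else biggest)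
          else biggest + 1
        else biggest) =
        (fun (acc : Int) (wh : {x // x ∈ ws}) =>
          if pvFirst wh.1 = pvLast actual then
            max acc (b + 1 + pvChain (pvLast wh.1) (ws.erase wh.1)) else acc) := by
      funext acc wh
      have hmem := wh.2
      have hlt : (ws.erase wh.1).length < ws.length := by
        have := List.length_pos_of_mem hmem
        have := List.length_erase_of_mem hmem
        omega
      simp only [ne_eq, h1, not_false_eq_true, if_true]
      rw [ih _ hlt _ _ _ rfl, if_gt_eq_max]
    rw [hfun]
    rw [foldl_max_if_shift (fun wh => pvChain (pvLast wh.1) (ws.erase wh.1))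
      (fun wh => pvFirst wh.1 = pvLast actual) (fun wh => pvChain_nonneg _ _) b ws.attach b le_rfl]
    have hmap : (ws.attach.map (fun wh =>
        if pvFirst wh.1 = pvLast actual then 1 + pvChain (pvLast wh.1) (ws.erase wh.1) else 0)) =
        (ws.map (fun w => if pvFirst w = pvLast actual then 1 + pvChain (pvLast w) (ws.erase w) else 0)) :=
      List.attach_map_val (l := ws) (f := fun w => if pvFirst w = pvLast actual then 1 + pvChain (pvLast w) (ws.erase w) else 0)
    rw [hmap, ← pvChain_eq]
    have := pvChain_nonneg (pvLast actual) ws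
    omega

-- ---- B-side ----
lemma map_getD {α β : Type} (f : α → β) (l : List α) (j : Nat) (hj : j < l.length) (d : β) (d' : α) :
    (l.map f).getD j d = f (l.getD j d') := by
  rw [List.getD_eq_getElem _ _ (by simpa using hj), List.getD_eq_getElem _ _ hj, List.getElem_map]

lemma testBit_one_shiftLeft (j k : Nat) : (1 <<< j).testBit k = decide (j = k) := by
  rw [Nat.one_shiftLeft]; exact Nat.testBit_two_pow

lemma maskSub_cons_perm (ws : List String) (m j : Nat) (hj : j < ws.length) (hb : m.testBit j = true) :
    (maskSub ws m).Perm (ws.getD j "" :: maskSub ws (m ^^^ (1 <<< j))) := by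
  have hxb : ∀ k, (m ^^^ (1 <<< j)).testBit k = if j = k then !(m.testBit k) else m.testBit k := by
    intro k
    rw [Nat.testBit_xor, testBit_one_shiftLeft]
    by_cases h : j = k <;> simp [h]
  have hdec : List.range ws.length = List.range j ++ j :: ((List.range (ws.length - j - 1)).map (fun t => j + 1 + t)) := by
    have h1 : ws.length = j + (1 + (ws.length - j - 1)) := by omega
    rw [h1, List.range_add, List.range_add]
    simp only [show List.range 1 = [0] from rfl, List.map_cons, List.cons_append,
      List.nil_append, List.map_map]
    have h2 : j + (1 + (ws.length - j - 1)) - j - 1 = ws.length - j - 1 := by omega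
    rw [h2]
    have h4 : List.map ((fun x => j + x) ∘ fun x => 1 + x) (List.range (ws.length - j - 1)) =
        List.map (fun t => j + 1 + t) (List.range (ws.length - j - 1)) :=
      List.map_congr_left (fun t _ => by simp only [Function.comp_apply]; omega)
    rw [h4]
    simp
  have hsame : ∀ (l : List Nat), (∀ k ∈ l, k ≠ j) →
      l.filter (fun k => (m ^^^ (1 <<< j)).testBit k) = l.filter (fun k => m.testBit k) := by
    intro l hl
    apply List.filter_congr
    intro k hk
    rw [hxb k, if_neg (fun h => (hl k hk) h.symm)]
  have e1 := hsame (List.range j) (by intro k hk; have := List.mem_range.mp hk; omega)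
  have e2 := hsame ((List.range (ws.length - j - 1)).map (fun t => j + 1 + t))
    (by intro k hk; obtain ⟨t, _, ht⟩ := List.mem_map.mp hk; omega)
  have hLm : maskSub ws m =
      ((List.range j).filter (fun k => m.testBit k) ++ j ::
        ((List.range (ws.length - j - 1)).map (fun t => j + 1 + t)).filter (fun k => m.testBit k)).map
        (fun k => ws.getD k "") := by
    unfold maskSub
    rw [hdec, List.filter_append, List.filter_cons]
    simp [hb]
  have hLx : maskSub ws (m ^^^ (1 <<< j)) =
      ((List.range j).filter (fun k => m.testBit k) ++
        ((List.range (ws.length - j - 1)).map (fun t => j + 1 + t)).filter (fun k => m.testBit k)).map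
        (fun k => ws.getD k "") := by
    unfold maskSub
    rw [hdec, List.filter_append, List.filter_cons, e1, e2]
    simp [hxb j, hb]
  rw [hLm, hLx]
  simp only [List.map_append, List.map_cons]
  exact List.perm_middle

lemma map_getD_range {α : Type} (l : List α) (d : α) : (List.range l.length).map (fun j => l.getD j d) = l := by
  apply List.ext_getElem
  · simp
  · intro i h1 h2
    simp only [List.getElem_map, List.getElem_range]
    exact (List.getD_eq_getElem l d h2).symm ▸ rfl

lemma maskSub_full (ws : List String) : maskSub ws (2 ^ ws.length - 1) = ws := by
  unfold maskSub
  have : (List.range ws.length).filter (fun j => (2 ^ ws.length - 1).testBit j) = List.range ws.length := by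
    rw [List.filter_congr (q := fun _ => true), List.filter_true]
    intro x hx
    simp [Nat.testBit_two_pow_sub_one, List.mem_range.mp hx]
  rw [this, map_getD_range]

lemma pvChain_maskSub (ws : List String) (m : Nat) (c : Char) :
    pvChain c (maskSub ws m) =
      ((List.range ws.length).map (fun j =>
        if m.testBit j ∧ pvFirst (ws.getD j "") = c then
          1 + pvChain (pvLast (ws.getD j "")) (maskSub ws (m ^^^ (1 <<< j))) else 0)).foldl max 0 := by
  have key : ∀ j, j < ws.length → m.testBit j = true →
      pvChain (pvLast (ws.getD j "")) ((maskSub ws m).erase (ws.getD j "")) =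
      pvChain (pvLast (ws.getD j "")) (maskSub ws (m ^^^ (1 <<< j))) := by
    intro j hj hbit
    have hp := maskSub_cons_perm ws m j hj hbit
    have hmem : ws.getD j "" ∈ maskSub ws m := hp.mem_iff.mpr (List.mem_cons_self)
    exact pvChain_perm _ _ (((List.perm_cons_erase hmem).symm.trans hp).cons_inv) _
  rw [pvChain_eq]
  have hL : (maskSub ws m).map (fun w =>
        if pvFirst w = c then 1 + pvChain (pvLast w) ((maskSub ws m).erase w) else 0) =
      ((List.range ws.length).filter (fun j => m.testBit j)).map (fun j =>
        if pvFirst (ws.getD j "") = c then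
          1 + pvChain (pvLast (ws.getD j "")) ((maskSub ws m).erase (ws.getD j "")) else 0) := by
    simp only [maskSub, List.map_map, Function.comp_def]
  rw [hL, foldl_max_filter _ _ (by
    intro j
    by_cases h : pvFirst (ws.getD j "") = c
    · rw [if_pos h]; have := pvChain_nonneg (pvLast (ws.getD j "")) ((maskSub ws m).erase (ws.getD j "")); omega
    · rw [if_neg h])]
  apply congrArg (List.foldl max 0)
  apply List.map_congr_left
  intro j hj
  have hjn := List.mem_range.mp hj
  by_cases hbit : m.testBit j
  · rw [if_pos hbit]
    by_cases hf : pvFirst (ws.getD j "") = c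
    · rw [if_pos hf, if_pos ⟨hbit, hf⟩, key j hjn hbit]
      omega
    · rw [if_neg hf, if_neg (fun h => hf h.2)]
  · rw [if_neg hbit, if_neg (fun h => hbit h.1)]

lemma pvMemoF_spec (ws : List String) : ∀ (mask : Nat) (c : Char) (memo : PySem.Dict (Nat × Char) Int),
    (∀ m' c' v, memo.get? (m', c') = some v → v = pvChain c' (maskSub ws m')) →
    (pvMemoF (ws.map pvFirst) (ws.map pvLast) c mask memo).1 = pvChain c (maskSub ws mask) ∧
    (∀ m' c' v, (pvMemoF (ws.map pvFirst) (ws.map pvLast) c mask memo).2.get? (m', c') = some v →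
      v = pvChain c' (maskSub ws m')) := by
  intro mask
  induction mask using Nat.strong_induction_on with
  | _ mask ih =>
  intro c memo hval
  rw [pvMemoF]
  cases hget : memo.get? (mask, c) with
  | some v =>
    exact ⟨hval mask c v hget, hval⟩
  | none =>
    have loop : ∀ (l : List Nat), (∀ j ∈ l, j < ws.length) →
        ∀ (best : Int) (memo' : PySem.Dict (Nat × Char) Int),
        (∀ m' c' v, memo'.get? (m', c') = some v → v = pvChain c' (maskSub ws m')) →
        (l.foldl
          (fun (acc : Int × PySem.Dict (Nat × Char) Int) j =>
            if h : mask.testBit j ∧ (ws.map pvFirst).getD j ' ' = c then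
              let s := pvMemoF (ws.map pvFirst) (ws.map pvLast) ((ws.map pvLast).getD j ' ')
                (mask ^^^ (1 <<< j)) acc.2
              (if s.1 + 1 > acc.1 then s.1 + 1 else acc.1, s.2)
            else acc)
          (best, memo')).1 =
          l.foldl (fun b j =>
            if mask.testBit j ∧ pvFirst (ws.getD j "") = c then
              max b (pvChain (pvLast (ws.getD j "")) (maskSub ws (mask ^^^ (1 <<< j))) + 1) else b) best ∧
        (∀ m' c' v, (l.foldl
          (fun (acc : Int × PySem.Dict (Nat × Char) Int) j =>
            if h : mask.testBit j ∧ (ws.map pvFirst).getD j ' ' = c then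
              let s := pvMemoF (ws.map pvFirst) (ws.map pvLast) ((ws.map pvLast).getD j ' ')
                (mask ^^^ (1 <<< j)) acc.2
              (if s.1 + 1 > acc.1 then s.1 + 1 else acc.1, s.2)
            else acc)
          (best, memo')).2.get? (m', c') = some v → v = pvChain c' (maskSub ws m')) := by
      intro l
      induction l with
      | nil => intro _ best memo' hm; exact ⟨rfl, hm⟩
      | cons j l ihl =>
        intro hl best memo' hm
        have hj : j < ws.length := hl j List.mem_cons_self
        simp only [List.foldl_cons]
        rw [map_getD pvFirst ws j hj ' ' "", map_getD pvLast ws j hj ' ' ""]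
        by_cases hQ : mask.testBit j ∧ pvFirst (ws.getD j "") = c
        · rw [dif_pos hQ, if_pos hQ]
          have hsub := ih (mask ^^^ (1 <<< j)) (xor_bit_lt mask j hQ.1)
            (pvLast (ws.getD j "")) memo' hm
          obtain ⟨hs1, hs2⟩ := hsub
          simp only [hs1]
          rw [if_gt_eq_max]
          exact ihl (fun k hk => hl k (List.mem_cons_of_mem _ hk)) _ _ hs2
        · rw [dif_neg hQ, if_neg hQ]
          exact ihl (fun k hk => hl k (List.mem_cons_of_mem _ hk)) best memo' hm
    have hrange : ∀ j ∈ List.range (ws.map pvFirst).length, j < ws.length := by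
      intro j hj
      rw [List.length_map] at hj
      exact List.mem_range.mp hj
    obtain ⟨hfst, hsnd⟩ := loop (List.range (ws.map pvFirst).length) hrange 0 memo hval
    have hpure : (List.range (ws.map pvFirst).length).foldl (fun b j =>
        if mask.testBit j ∧ pvFirst (ws.getD j "") = c then
          max b (pvChain (pvLast (ws.getD j "")) (maskSub ws (mask ^^^ (1 <<< j))) + 1) else b) 0 =
        pvChain c (maskSub ws mask) := by
      rw [List.length_map, pvChain_maskSub]
      have hstep : ∀ (b : Int), ∀ j ∈ List.range ws.length,
          (if mask.testBit j ∧ pvFirst (ws.getD j "") = c then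
            max b (pvChain (pvLast (ws.getD j "")) (maskSub ws (mask ^^^ (1 <<< j))) + 1) else b) =
          (if mask.testBit j ∧ pvFirst (ws.getD j "") = c then
            max b (if mask.testBit j ∧ pvFirst (ws.getD j "") = c then
              1 + pvChain (pvLast (ws.getD j "")) (maskSub ws (mask ^^^ (1 <<< j))) else 0) else b) := by
        intro b j _
        by_cases hQ : mask.testBit j ∧ pvFirst (ws.getD j "") = c
        · rw [if_pos hQ, if_pos hQ, if_pos hQ]
          omega
        · rw [if_neg hQ, if_neg hQ]
      rw [List.foldl_ext _ _ 0 hstep]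
      rw [foldl_max_if_eq _ _ (by
          intro j
          by_cases h : mask.testBit j ∧ pvFirst (ws.getD j "") = c
          · rw [if_pos h]
            have := pvChain_nonneg (pvLast (ws.getD j "")) (maskSub ws (mask ^^^ (1 <<< j)))
            omega
          · rw [if_neg h])
        (by intro j h; rw [if_neg h]) _ 0 le_rfl]
    constructor
    · simp only [hfst, hpure]
    · intro m' c' v hv
      simp only at hv
      rw [PySem.Dict.get?_insert] at hv
      by_cases hk : (m', c') = (mask, c)
      · rw [if_pos hk] at hv
        obtain ⟨hm, hc⟩ := Prod.mk.injEq .. ▸ hk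
        cases hv
        rw [hm, hc, hfst, hpure]
      · rw [if_neg hk] at hv
        exact hsnd m' c' v hv

lemma words_rec_alt_eq (actual : String) (ws : List String) (b : Int) :
    words_rec_alt actual ws b = b + pvChain (pvLast actual) ws := by
  simp only [words_rec_alt]
  by_cases h0 : ws.length = 0
  · rw [if_pos h0]
    have : ws = [] := List.eq_nil_of_length_eq_zero h0
    subst this
    rw [pvChain_nil]
    omega
  · rw [if_neg h0]
    have hempty : ∀ m' c' v, (PySem.Dict.empty : PySem.Dict (Nat × Char) Int).get? (m', c') = some v →
        v = pvChain c' (maskSub ws m') := by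
      intro m' c' v hv
      rw [PySem.Dict.get?_empty] at hv
      cases hv
    obtain ⟨h1, _⟩ := pvMemoF_spec ws ((1 <<< ws.length) - 1) (pvLast actual) PySem.Dict.empty hempty
    rw [h1, Nat.one_shiftLeft, maskSub_full]

-- ===== VERDICT (by name: the statement is the Claim_ definition above) =====
theorem words_rec_spec : Claim_equal_words_rec := by
  intro actual words biggest_all _ _
  unfold Spec_words_rec
  rw [words_rec_eq, words_rec_alt_eq]
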